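-- pv_equiv track=rewrite | github.com/sumnerevans/advent-of-code | 2017/03.py | grid_adjs
-- ===== SOURCE A (Python) =====
-- import itertools as it
-- from typing import Dict, Generator, List, Tuple
--
-- def grid_adjs(
--     coord: Tuple[int, ...],
--     bounds: Tuple[Tuple[int, int], ...] = None,
--     inclusive: bool = True,
-- ) -> Generator[Tuple[int, ...], None, None]:
--     # Iterate through all of the deltas for the N dimensions of the coord. A delta is
--     # -1, 0, or 1 indicating that the adjacent cell is one lower, same level, or higher
--     # than the given coordinate.
--     for delta in it.product((-1, 0, 1), repeat=len(coord)):
--         if all(d == 0 for d in delta):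
--             # This is the coord itself, skip.
--             continue
--
--         # Check the bounds
--         if bounds is not None:
--             inbounds = True
--             for i, (d, (low, high)) in enumerate(zip(delta, bounds)):
--                 if inclusive and not (low <= coord[i] + d <= high):
--                     inbounds = False
--                     break
--                 elif not inclusive and not (low < coord[i] + d < high):
--                     inbounds = False
--                     break
--             if not inbounds:
--                 continue
--
--         yield tuple(c + d for c, d in zip(coord, delta))
-- ===== SOURCE B (Python) =====
-- import itertools as it
--
-- def grid_adjs(coord, bounds=None, inclusive=True):
--     # Per-dimension table of allowed deltas, then one reduced product.
--     choices = []
--     for i, c in enumerate(coord):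
--         if bounds is None or i >= len(bounds):
--             choices.append((-1, 0, 1))
--         else:
--             low, high = bounds[i]
--             if inclusive:
--                 choices.append(tuple(d for d in (-1, 0, 1) if low <= c + d <= high))
--             else:
--                 choices.append(tuple(d for d in (-1, 0, 1) if low < c + d < high))
--     for delta in it.product(*choices):
--         if any(delta):
--             yield tuple(c + d for c, d in zip(coord, delta))
-- ===== Notes on version B (the rewrite author's own statement) =====
-- stated objective: faster
-- what changed: Instead of generating all 3^n delta tuples and bounds-checking each full tuple, B builds a per-dimension table of allowed deltas and takes the product of only those candidates, so out-of-bounds deltas are pruned per dimension before the product is formed; intended as faster (a timing run saw A time out at n=16 dims where B returned, but no clean ratio could be measured).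
import Mathlib
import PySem

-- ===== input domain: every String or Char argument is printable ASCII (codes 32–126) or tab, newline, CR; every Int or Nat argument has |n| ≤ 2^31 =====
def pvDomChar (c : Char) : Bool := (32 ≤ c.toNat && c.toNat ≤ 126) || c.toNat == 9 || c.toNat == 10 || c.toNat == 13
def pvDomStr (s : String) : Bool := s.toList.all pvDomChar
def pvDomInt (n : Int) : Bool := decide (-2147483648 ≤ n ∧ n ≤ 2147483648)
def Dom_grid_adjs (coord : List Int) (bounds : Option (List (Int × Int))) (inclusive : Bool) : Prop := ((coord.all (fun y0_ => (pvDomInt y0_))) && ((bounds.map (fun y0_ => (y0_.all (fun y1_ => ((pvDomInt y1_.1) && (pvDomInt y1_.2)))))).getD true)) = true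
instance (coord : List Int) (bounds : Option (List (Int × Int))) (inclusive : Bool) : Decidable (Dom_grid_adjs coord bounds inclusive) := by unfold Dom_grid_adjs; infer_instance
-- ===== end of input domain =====

-- B builds a per-dimension table of allowed deltas and takes the product of only those
-- candidates, instead of generating all 3^n deltas and bounds-checking each full tuple
-- (objective: intended as faster by pruning before the product — a timing run saw A
-- time out at 16 dimensions where B returned, though no clean ratio could be measured;
-- return-value equivalence; A is a generator, compared as the list of yielded tuples).

-- ===== PORT A =====
-- it.product((-1, 0, 1), repeat=n): first factor varies slowest.
def pvDeltasA : Nat → List (List Int)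
  | 0 => [[]]
  | n + 1 => ([-1, 0, 1] : List Int).flatMap (fun d => (pvDeltasA n).map (fun t => d :: t))

-- the inner `for i, (d, (low, high)) in enumerate(zip(delta, bounds))` loop with its
-- early break; coord is consumed in parallel (delta has exactly len(coord) entries,
-- so coord[i] is the element aligned with delta[i]).
def pvInbA : List Int → List Int → List (Int × Int) → Bool → Bool
  | c :: cs, d :: ds, (low, high) :: bs, inc =>
    if inc then
      if low ≤ c + d ∧ c + d ≤ high then pvInbA cs ds bs inc else false
    else
      if low < c + d ∧ c + d < high then pvInbA cs ds bs inc else false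
  | _, _, _, _ => true

def grid_adjs (coord : List Int) (bounds : Option (List (Int × Int))) (inclusive : Bool) : List (List Int) :=
  (pvDeltasA coord.length).foldl
    (fun acc delta =>
      if delta.all (fun d => d == 0) then acc
      else
        match bounds with
        | some bs =>
          if pvInbA coord delta bs inclusive then
            acc ++ [List.zipWith (fun c d => c + d) coord delta]
          else acc
        | none => acc ++ [List.zipWith (fun c d => c + d) coord delta]) []

-- ===== PORT B =====
-- the `choices` table: one list of allowed deltas per dimension; a short bounds list
-- leaves the trailing dimensions unrestricted (i >= len(bounds)).
def pvChoicesB : List Int → Option (List (Int × Int)) → Bool → List (List Int)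
  | [], _, _ => []
  | _ :: cs, none, inc => ([-1, 0, 1] : List Int) :: pvChoicesB cs none inc
  | _ :: cs, some [], inc => ([-1, 0, 1] : List Int) :: pvChoicesB cs (some []) inc
  | c :: cs, some ((low, high) :: bs), inc =>
    (([-1, 0, 1] : List Int).filter
      (fun d => if inc then decide (low ≤ c + d ∧ c + d ≤ high)
                else decide (low < c + d ∧ c + d < high)))
      :: pvChoicesB cs (some bs) inc

-- it.product(*choices)
def pvProdB : List (List Int) → List (List Int)
  | [] => [[]]
  | ch :: rest => ch.flatMap (fun d => (pvProdB rest).map (fun t => d :: t))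

def grid_adjs_alt (coord : List Int) (bounds : Option (List (Int × Int))) (inclusive : Bool) : List (List Int) :=
  ((pvProdB (pvChoicesB coord bounds inclusive)).filter
      (fun delta => delta.any (fun d => d != 0))).map
    (fun delta => List.zipWith (fun c d => c + d) coord delta)

-- ===== PRECONDITION & SPEC =====
def Spec_grid_adjs (coord : List Int) (bounds : Option (List (Int × Int))) (inclusive : Bool) (out : List (List Int)) : Prop := out = grid_adjs_alt coord bounds inclusive
instance (coord : List Int) (bounds : Option (List (Int × Int))) (inclusive : Bool) (out : List (List Int)) : Decidable (Spec_grid_adjs coord bounds inclusive out) := by unfold Spec_grid_adjs; infer_instance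

-- ===== CLAIM (what is proved, stated in full; the proofs are below) =====
def Claim_equal_grid_adjs : Prop := ∀ (coord : List Int) (bounds : Option (List (Int × Int))) (inclusive : Bool), Dom_grid_adjs coord bounds inclusive → Spec_grid_adjs coord bounds inclusive (grid_adjs coord bounds inclusive)

-- ===== LEMMAS AND PROOFS =====

-- the unified per-tuple bounds predicate (A's check; `true` when bounds is None)
def pvP (coord : List Int) (bounds : Option (List (Int × Int))) (inclusive : Bool) (delta : List Int) : Bool :=
  match bounds with
  | none => true
  | some bs => pvInbA coord delta bs inclusive

lemma pvInbA_cons (c d low high : Int) (cs ds : List Int) (bs : List (Int × Int)) (inc : Bool) :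
    pvInbA (c :: cs) (d :: ds) ((low, high) :: bs) inc =
      ((if inc then decide (low ≤ c + d ∧ c + d ≤ high)
        else decide (low < c + d ∧ c + d < high)) && pvInbA cs ds bs inc) := by
  cases inc <;> simp [pvInbA]

lemma foldl_stepA (coord : List Int) (bounds : Option (List (Int × Int))) (inclusive : Bool) :
    ∀ (l : List (List Int)) (acc : List (List Int)),
      l.foldl
        (fun acc delta =>
          if delta.all (fun d => d == 0) then acc
          else
            match bounds with
            | some bs =>
              if pvInbA coord delta bs inclusive then
                acc ++ [List.zipWith (fun c d => c + d) coord delta]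
              else acc
            | none => acc ++ [List.zipWith (fun c d => c + d) coord delta]) acc =
      acc ++ (l.filter
          (fun delta => !(delta.all (fun d => d == 0)) && pvP coord bounds inclusive delta)).map
        (fun delta => List.zipWith (fun c d => c + d) coord delta) := by
  intro l
  induction l with
  | nil => intro acc; simp
  | cons hd tl ih =>
    intro acc
    rw [List.foldl_cons, ih, List.filter_cons]
    by_cases hz : (hd.all fun d => d == 0) = true
    · simp [hz]
    · cases bounds with
      | none => simp [pvP, hz]
      | some bs =>
        by_cases hb : pvInbA coord hd bs inclusive = true
        · simp [pvP, hz, hb]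
        · simp [pvP, hz, hb]

lemma flatMap_filter_left {α β : Type} (l : List α) (ok : α → Bool) (g : α → List β) :
    (l.filter ok).flatMap g = l.flatMap (fun d => if ok d then g d else []) := by
  induction l with
  | nil => rfl
  | cons hd tl ih =>
    by_cases h : ok hd <;> simp [h, ih]

lemma filter_flatMap' {α β : Type} (l : List α) (g : α → List β) (p : β → Bool) :
    (l.flatMap g).filter p = l.flatMap (fun d => (g d).filter p) := by
  induction l with
  | nil => rfl
  | cons hd tl ih => simp [List.flatMap_cons, List.filter_append, ih]

-- Lemma 2: B's reduced product is A's full product filtered by the bounds predicate.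
lemma prod_choices_eq (inc : Bool) :
    ∀ (cs : List Int) (bounds : Option (List (Int × Int))),
      pvProdB (pvChoicesB cs bounds inc) =
        (pvDeltasA cs.length).filter (pvP cs bounds inc) := by
  intro cs
  induction cs with
  | nil =>
    intro bounds
    cases bounds <;> simp [pvChoicesB, pvProdB, pvDeltasA, pvP, pvInbA]
  | cons c cs ih =>
    intro bounds
    match bounds with
    | none =>
      have h1 : pvP (c :: cs) none inc = fun _ => true := by funext t; rfl
      have h2 : pvP cs none inc = fun _ => true := by funext t; rfl
      simp [pvChoicesB, pvProdB, pvDeltasA, ih none, h1, h2]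
    | some [] =>
      have h1 : pvP (c :: cs) (some []) inc = fun _ => true := by
        funext t; cases t <;> simp [pvP, pvInbA]
      have h2 : pvP cs (some []) inc = fun _ => true := by
        funext t; cases t <;> simp [pvP, pvInbA]
      simp [pvChoicesB, pvProdB, pvDeltasA, ih (some []), h1, h2]
    | some ((low, high) :: bs) =>
      have key :
          (pvDeltasA (c :: cs).length).filter (pvP (c :: cs) (some ((low, high) :: bs)) inc) =
            (([-1, 0, 1] : List Int).filter
              (fun d => if inc then decide (low ≤ c + d ∧ c + d ≤ high)
                        else decide (low < c + d ∧ c + d < high))).flatMap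
              (fun d => ((pvDeltasA cs.length).filter (pvP cs (some bs) inc)).map
                (fun t => d :: t)) := by
        rw [flatMap_filter_left]
        show (pvDeltasA (cs.length + 1)).filter _ = _
        rw [pvDeltasA, filter_flatMap']
        apply List.flatMap_congr
        intro d _
        rw [List.filter_map]
        have hp : ∀ t : List Int,
            pvP (c :: cs) (some ((low, high) :: bs)) inc (d :: t) =
              ((if inc then decide (low ≤ c + d ∧ c + d ≤ high)
                else decide (low < c + d ∧ c + d < high)) && pvP cs (some bs) inc t) := by
          intro t; simp [pvP, pvInbA_cons]
        by_cases hd : (if inc then decide (low ≤ c + d ∧ c + d ≤ high)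
            else decide (low < c + d ∧ c + d < high)) = true
        · simp only [hd, if_true]
          congr 1
          apply List.filter_congr
          intro t _
          simp only [Function.comp_apply, hp, hd, Bool.true_and]
        · simp only [hd, Bool.false_eq_true, if_false]
          have hnil : (pvDeltasA cs.length).filter
              ((pvP (c :: cs) (some ((low, high) :: bs)) inc) ∘ (fun t => d :: t)) = [] := by
            apply List.filter_eq_nil_iff.mpr
            intro t _
            simp only [Function.comp_apply, hp]
            cases inc <;> simp_all
          simp [hnil]
      rw [key]
      simp [pvChoicesB, pvProdB, ih (some bs)]

lemma any_ne_eq_not_all_eq (delta : List Int) :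
    (delta.any fun d => d != 0) = !(delta.all fun d => d == 0) := by
  rw [Bool.eq_iff_iff]
  simp [List.any_eq_true]

-- ===== VERDICT (by name: the statement is the Claim_ definition above) =====
theorem grid_adjs_spec : Claim_equal_grid_adjs := by
  intro coord bounds inclusive _
  show grid_adjs coord bounds inclusive = grid_adjs_alt coord bounds inclusive
  rw [grid_adjs, grid_adjs_alt, foldl_stepA, prod_choices_eq, List.filter_filter]
  simp only [List.nil_append]
  congr 1
  apply List.filter_congr
  intro delta _
  rw [any_ne_eq_not_all_eq, Bool.and_comm]
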